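-- pv_equiv track=rewrite | github.com/suna-ji/algorithmPython | src/bruteForce/3085.py | check
-- ===== SOURCE A (Python) =====
-- def check(graph, start_row, end_row, start_col, end_col):
--     n = len(graph)
--     ans = 1
--     for i in range(start_row, end_row+1): # 행검사
--         cnt = 1
--         for j in range(1, n): # 1부터 시작하니까 이전 사탕과 계속 비교
--             if graph[i][j] == graph[i][j-1]:
--                 cnt += 1
--             else:
--                 cnt = 1
--             if ans < cnt:
--                 ans = cnt
--     for i in range(start_col, end_col+1):
--         cnt = 1
--         for j in range(1, n):
--             if graph[j][i] == graph[j-1][i]: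
--                 cnt += 1
--             else:
--                 cnt = 1
--             if ans < cnt:
--                 ans = cnt
--     return ans
-- ===== SOURCE B (Python) =====
-- def _run_end(seq, k):
--     """Index one past the end of the run of equal elements starting at seq[k]."""
--     j = k + 1
--     while j < len(seq) and seq[j] == seq[k]:
--         j += 1
--     return j
--
--
-- def _longest_run(seq):
--     """Longest run of equal adjacent elements, by jumping run-to-run (0 if empty)."""
--     best = 0
--     k = 0
--     while k < len(seq):
--         j = _run_end(seq, k)
--         best = max(best, j - k)
--         k = j
--     return best
--
--
-- def check(graph, start_row, end_row, start_col, end_col):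
--     n = len(graph)
--     best = 1
--     if n >= 2:
--         for i in range(start_row, end_row + 1):
--             best = max(best, _longest_run([graph[i][j] for j in range(n)]))
--         for i in range(start_col, end_col + 1):
--             best = max(best, _longest_run([graph[j][i] for j in range(n)]))
--     return best
-- ===== Notes on version B (the rewrite author's own statement) =====
-- stated objective: alternative
-- what changed: Instead of A's per-cell counter that is reset and compared against a global running maximum inside nested index loops, B materialises each row/column as a list and computes its longest run with a run-jumping helper (find the end of the run starting at k, take its length, jump to the next run), taking a max per line and short-circuiting grids with fewer than 2 rows.
import Mathlib
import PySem

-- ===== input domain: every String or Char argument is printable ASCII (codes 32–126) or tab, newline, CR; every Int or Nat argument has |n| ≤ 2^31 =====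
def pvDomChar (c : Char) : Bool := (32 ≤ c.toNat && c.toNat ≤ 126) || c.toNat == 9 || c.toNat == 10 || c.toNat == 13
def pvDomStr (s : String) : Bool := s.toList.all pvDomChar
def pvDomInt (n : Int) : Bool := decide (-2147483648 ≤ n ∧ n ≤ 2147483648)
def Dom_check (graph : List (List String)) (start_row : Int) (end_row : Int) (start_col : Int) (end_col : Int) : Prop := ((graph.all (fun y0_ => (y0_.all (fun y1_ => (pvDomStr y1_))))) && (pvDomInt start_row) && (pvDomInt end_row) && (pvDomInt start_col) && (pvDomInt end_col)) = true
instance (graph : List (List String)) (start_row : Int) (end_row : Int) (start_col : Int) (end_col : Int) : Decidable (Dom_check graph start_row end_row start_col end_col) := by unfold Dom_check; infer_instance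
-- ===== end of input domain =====

-- B re-implements the search as a run-jumping helper (advance to each run's end, recurse on the
-- rest) applied to materialised row/column lists, with a short-circuit for grids of size < 2;
-- objective: alternative decomposition, same asymptotic cost.


-- ===== PORT A =====
def check (graph : List (List String)) (start_row : Int) (end_row : Int) (start_col : Int) (end_col : Int) : Int :=
  let n : Int := (graph.length : Int)
  let ans : Int := 1
  let ans := (PySem.List.pyRange start_row (end_row + 1) 1).foldl (fun ans i =>
      ((PySem.List.pyRange 1 n 1).foldl (fun (s : Int × Int) j =>
          let cnt : Int :=
            if PySem.List.pyGetD (PySem.List.pyGetD graph i []) j "" =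
               PySem.List.pyGetD (PySem.List.pyGetD graph i []) (j - 1) "" then s.1 + 1 else 1
          (cnt, if s.2 < cnt then cnt else s.2)) ((1 : Int), ans)).2) ans
  let ans := (PySem.List.pyRange start_col (end_col + 1) 1).foldl (fun ans i =>
      ((PySem.List.pyRange 1 n 1).foldl (fun (s : Int × Int) j =>
          let cnt : Int :=
            if PySem.List.pyGetD (PySem.List.pyGetD graph j []) i "" =
               PySem.List.pyGetD (PySem.List.pyGetD graph (j - 1) []) i "" then s.1 + 1 else 1
          (cnt, if s.2 < cnt then cnt else s.2)) ((1 : Int), ans)).2) ans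
  ans

-- ===== PORT B =====
-- port of Source B's _run_end: number of further elements equal to the run's head
def runLen (x : String) : List String → Nat
  | [] => 0
  | y :: ys => if y = x then runLen x ys + 1 else 0

-- port of Source B's _longest_run: jump from one run's start to its end
def longestRun (seq : List String) : Int :=
  match seq with
  | [] => 0
  | x :: rest =>
      max ((1 + runLen x rest : Nat) : Int) (longestRun (rest.drop (runLen x rest)))
termination_by seq.length
decreasing_by simp

def check_alt (graph : List (List String)) (start_row : Int) (end_row : Int) (start_col : Int) (end_col : Int) : Int :=
  let n : Int := (graph.length : Int)
  let best : Int := 1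
  if 2 ≤ n then
    let best := (PySem.List.pyRange start_row (end_row + 1) 1).foldl (fun b i =>
        max b (longestRun ((PySem.List.pyRange 0 n 1).map
          (fun j => PySem.List.pyGetD (PySem.List.pyGetD graph i []) j "")))) best
    let best := (PySem.List.pyRange start_col (end_col + 1) 1).foldl (fun b i =>
        max b (longestRun ((PySem.List.pyRange 0 n 1).map
          (fun j => PySem.List.pyGetD (PySem.List.pyGetD graph j []) i "")))) best
    best
  else best

-- ===== PRECONDITION & SPEC =====
-- Pre_check excludes exactly the inputs on which the Python A raises an IndexError
-- (a row index outside range in the row loop, a too-short row, or a column index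
-- outside some row's range); A returns no value there.
def Pre_check (graph : List (List String)) (start_row : Int) (end_row : Int) (start_col : Int) (end_col : Int) : Prop :=
  2 ≤ graph.length →
    ((end_row + 1 ≤ start_row ∨
       (-(graph.length : Int) ≤ start_row ∧ end_row < (graph.length : Int) ∧
        ∀ i ∈ PySem.List.pyRange start_row (end_row + 1) 1,
          graph.length ≤ (PySem.List.pyGetD graph i []).length)) ∧
     (end_col + 1 ≤ start_col ∨
       ∀ row ∈ graph, -(row.length : Int) ≤ start_col ∧ end_col < (row.length : Int)))
instance (graph : List (List String)) (start_row : Int) (end_row : Int) (start_col : Int) (end_col : Int) : Decidable (Pre_check graph start_row end_row start_col end_col) := by unfold Pre_check; infer_instance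

def pvWitness_check : List (List String) × Int × Int × Int × Int :=
  ([["a", "b"], ["b", "b"]], 0, 1, 0, 1)

def Spec_check (graph : List (List String)) (start_row : Int) (end_row : Int) (start_col : Int) (end_col : Int) (out : Int) : Prop := out = check_alt graph start_row end_row start_col end_col
instance (graph : List (List String)) (start_row : Int) (end_row : Int) (start_col : Int) (end_col : Int) (out : Int) : Decidable (Spec_check graph start_row end_row start_col end_col out) := by unfold Spec_check; infer_instance

-- ===== CLAIM (what is proved, stated in full; the proofs are below) =====
def Claim_equal_check : Prop := ∀ (graph : List (List String)) (start_row : Int) (end_row : Int) (start_col : Int) (end_col : Int), Dom_check graph start_row end_row start_col end_col → Pre_check graph start_row end_row start_col end_col → Spec_check graph start_row end_row start_col end_col (check graph start_row end_row start_col end_col)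

-- ===== LEMMAS AND PROOFS =====

-- proof-side model of A's inner scan (state: previous element, current count, running max)
def aScan (prev : String) (cnt ans : Int) : List String → Int
  | [] => ans
  | y :: ys =>
      let c : Int := if y = prev then cnt + 1 else 1
      aScan y c (if ans < c then c else ans) ys

theorem longestRun_nil : longestRun [] = 0 := by
  rw [longestRun.eq_def]

theorem longestRun_cons (x : String) (rest : List String) :
    longestRun (x :: rest) =
      max ((1 + runLen x rest : Nat) : Int) (longestRun (rest.drop (runLen x rest))) := by
  rw [longestRun.eq_def]

theorem aScan_eq (rest : List String) : ∀ (prev : String) (cnt ans : Int), 1 ≤ cnt → cnt ≤ ans →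
    aScan prev cnt ans rest =
      max ans (max (cnt + (runLen prev rest : Int))
        (longestRun (rest.drop (runLen prev rest)))) := by
  induction rest with
  | nil =>
      intro prev cnt ans h1 h2
      simp only [aScan, runLen, List.drop_nil, longestRun_nil, Nat.cast_zero]
      omega
  | cons y ys ih =>
      intro prev cnt ans h1 h2
      by_cases hy : y = prev
      · subst hy
        simp only [aScan, runLen, if_true, List.drop_succ_cons]
        rw [ih y (cnt + 1) (if ans < cnt + 1 then cnt + 1 else ans) (by omega) (by split <;> omega)]
        push_cast
        generalize longestRun (List.drop (runLen y ys) ys) = L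
        have hr : (0 : Int) ≤ (runLen y ys : Int) := by positivity
        split <;> omega
      · simp only [aScan, runLen, if_neg hy, List.drop_zero]
        have hans : (if ans < (1 : Int) then (1 : Int) else ans) = ans := by
          rw [if_neg (by omega)]
        rw [hans, ih y 1 ans le_rfl (by omega), longestRun_cons]
        push_cast
        generalize longestRun (List.drop (runLen y ys) ys) = L
        omega

-- A's indexed inner fold over pyRange (k+1) len equals aScan on the suffix
theorem scan_bridge (seq : List String) : ∀ (rest : List String) (k : Nat) (x : String) (cnt ans : Int),
    seq.drop k = x :: rest →
    ((PySem.List.pyRange ((k : Int) + 1) (seq.length : Int) 1).foldl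
        (fun (s : Int × Int) j =>
          let c : Int := if PySem.List.pyGetD seq j "" = PySem.List.pyGetD seq (j - 1) "" then s.1 + 1 else 1
          (c, if s.2 < c then c else s.2)) (cnt, ans)).2 = aScan x cnt ans rest := by
  intro rest
  induction rest with
  | nil =>
      intro k x cnt ans hdrop
      have hlen : seq.length = k + 1 := by
        have hk : k < seq.length := by
          by_contra h
          rw [List.drop_eq_nil_of_le (by omega)] at hdrop
          simp at hdrop
        have := congrArg List.length hdrop
        simp [List.length_drop] at this
        omega
      rw [PySem.List.pyRange_one_eq_nil (by omega)]
      simp [aScan]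
  | cons y ys ih =>
      intro k x cnt ans hdrop
      have hk1 : k + 1 < seq.length := by
        have := congrArg List.length hdrop
        simp [List.length_drop] at this
        omega
      have hgy : seq[k + 1]? = some y := by
        have h : (List.drop k seq)[1]? = seq[k + 1]? := List.getElem?_drop
        rw [hdrop] at h
        simpa using h.symm
      have hgx : seq[k]? = some x := by
        have h : (List.drop k seq)[0]? = seq[k + 0]? := List.getElem?_drop
        rw [hdrop] at h
        simpa using h.symm
      have hy : PySem.List.pyGetD seq ((k : Int) + 1) "" = y := by
        have : ((k : Int) + 1) = ((k + 1 : Nat) : Int) := by push_cast; ring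
        rw [this, PySem.List.pyGetD_natCast]
        simp [List.getD, hgy]
      have hx : PySem.List.pyGetD seq ((k : Int) + 1 - 1) "" = x := by
        have : ((k : Int) + 1 - 1) = ((k : Nat) : Int) := by push_cast; ring
        rw [this, PySem.List.pyGetD_natCast]
        simp [List.getD, hgx]
      rw [PySem.List.pyRange_one_cons (by exact_mod_cast by omega)]
      simp only [List.foldl_cons, hy, hx]
      have hdrop' : seq.drop (k + 1) = y :: ys := by
        have := congrArg List.tail hdrop
        simpa [List.tail_drop] using this
      have hcast : (k : Int) + 1 + 1 = ((k + 1 : Nat) : Int) + 1 := by omega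
      rw [hcast, ih (k + 1) y _ _ hdrop']
      simp [aScan]

-- full scan of a nonempty sequence = running max floored by the incoming ans
theorem scan_full (seq : List String) (hne : seq ≠ []) (ans : Int) (h1 : 1 ≤ ans) :
    ((PySem.List.pyRange 1 (seq.length : Int) 1).foldl
        (fun (s : Int × Int) j =>
          let c : Int := if PySem.List.pyGetD seq j "" = PySem.List.pyGetD seq (j - 1) "" then s.1 + 1 else 1
          (c, if s.2 < c then c else s.2)) (1, ans)).2 = max ans (longestRun seq) := by
  obtain ⟨x, rest, rfl⟩ := List.exists_cons_of_ne_nil hne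
  have h := scan_bridge (x :: rest) rest 0 x 1 ans (by simp)
  simp only [Nat.cast_zero, zero_add] at h
  rw [h, aScan_eq rest x 1 ans le_rfl h1, longestRun_cons]
  push_cast
  ring_nf

-- outer folds: both bodies equal (fun a i => max a (g i)) on members, so the folds agree and stay ≥ 1
theorem foldl_outer (g : Int → Int) (F G : Int → Int → Int) (l : List Int)
    (hF : ∀ a i, i ∈ l → 1 ≤ a → F a i = max a (g i))
    (hG : ∀ a i, i ∈ l → 1 ≤ a → G a i = max a (g i)) :
    ∀ a, 1 ≤ a → l.foldl F a = l.foldl G a ∧ 1 ≤ l.foldl F a := by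
  induction l with
  | nil => intro a ha; exact ⟨rfl, ha⟩
  | cons i t ih =>
      intro a ha
      simp only [List.foldl_cons]
      rw [hF a i (by simp) ha, hG a i (by simp) ha]
      exact ih (fun a j hj => hF a j (List.mem_cons_of_mem _ hj))
        (fun a j hj => hG a j (List.mem_cons_of_mem _ hj))
        (max a (g i)) (le_trans ha (le_max_left _ _))

theorem foldl_fixed_pv {α : Type} (l : List α) (a : Int) :
    l.foldl (fun acc (_ : α) => acc) a = a := by
  induction l with
  | nil => rfl
  | cons x t ih => simp only [List.foldl_cons]; exact ih

-- A's row body equals max ans (longestRun of B's materialised sequence)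
theorem row_body (graph : List (List String)) (i ans : Int)
    (hn : 2 ≤ graph.length) (h1 : 1 ≤ ans) :
    ((PySem.List.pyRange 1 (graph.length : Int) 1).foldl
        (fun (s : Int × Int) j =>
          let c : Int := if PySem.List.pyGetD (PySem.List.pyGetD graph i []) j "" =
              PySem.List.pyGetD (PySem.List.pyGetD graph i []) (j - 1) "" then s.1 + 1 else 1
          (c, if s.2 < c then c else s.2)) (1, ans)).2 =
    max ans (longestRun ((PySem.List.pyRange 0 (graph.length : Int) 1).map
        (fun j => PySem.List.pyGetD (PySem.List.pyGetD graph i []) j ""))) := by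
  set f : Int → String := fun j => PySem.List.pyGetD (PySem.List.pyGetD graph i []) j "" with hf
  set seq : List String := (PySem.List.pyRange 0 (graph.length : Int) 1).map f with hseq
  have hlen : seq.length = graph.length := by
    simp [hseq, PySem.List.length_pyRange_one]
  have hcongr : ∀ (s : Int × Int), ∀ j ∈ PySem.List.pyRange 1 (graph.length : Int) 1,
      ((fun (s : Int × Int) j =>
          let c : Int := if f j = f (j - 1) then s.1 + 1 else 1
          (c, if s.2 < c then c else s.2)) s j) =
      ((fun (s : Int × Int) j =>
          let c : Int := if PySem.List.pyGetD seq j "" = PySem.List.pyGetD seq (j - 1) "" then s.1 + 1 else 1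
          (c, if s.2 < c then c else s.2)) s j) := by
    intro s j hj
    rw [PySem.List.mem_pyRange_one] at hj
    have e1 : PySem.List.pyGetD seq j "" = f j :=
      PySem.List.pyGetD_map_pyRange_of_nonneg f _ j "" (by omega) (by omega)
    have e2 : PySem.List.pyGetD seq (j - 1) "" = f (j - 1) :=
      PySem.List.pyGetD_map_pyRange_of_nonneg f _ (j - 1) "" (by omega) (by omega)
    simp only [e1, e2]
  have hne : seq ≠ [] := by
    intro h
    rw [h] at hlen
    simp at hlen
    omega
  calc ((PySem.List.pyRange 1 (graph.length : Int) 1).foldl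
        (fun (s : Int × Int) j =>
          let c : Int := if f j = f (j - 1) then s.1 + 1 else 1
          (c, if s.2 < c then c else s.2)) (1, ans)).2
      = ((PySem.List.pyRange 1 (seq.length : Int) 1).foldl
        (fun (s : Int × Int) j =>
          let c : Int := if PySem.List.pyGetD seq j "" = PySem.List.pyGetD seq (j - 1) "" then s.1 + 1 else 1
          (c, if s.2 < c then c else s.2)) (1, ans)).2 := by
        rw [hlen]
        exact congrArg Prod.snd (PySem.List.foldl_congr_mem _ _ _ _ hcongr)
    _ = max ans (longestRun seq) := scan_full seq hne ans h1

-- same for a column body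
theorem col_body (graph : List (List String)) (i ans : Int)
    (hn : 2 ≤ graph.length) (h1 : 1 ≤ ans) :
    ((PySem.List.pyRange 1 (graph.length : Int) 1).foldl
        (fun (s : Int × Int) j =>
          let c : Int := if PySem.List.pyGetD (PySem.List.pyGetD graph j []) i "" =
              PySem.List.pyGetD (PySem.List.pyGetD graph (j - 1) []) i "" then s.1 + 1 else 1
          (c, if s.2 < c then c else s.2)) (1, ans)).2 =
    max ans (longestRun ((PySem.List.pyRange 0 (graph.length : Int) 1).map
        (fun j => PySem.List.pyGetD (PySem.List.pyGetD graph j []) i ""))) := by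
  set f : Int → String := fun j => PySem.List.pyGetD (PySem.List.pyGetD graph j []) i "" with hf
  set seq : List String := (PySem.List.pyRange 0 (graph.length : Int) 1).map f with hseq
  have hlen : seq.length = graph.length := by
    simp [hseq, PySem.List.length_pyRange_one]
  have hcongr : ∀ (s : Int × Int), ∀ j ∈ PySem.List.pyRange 1 (graph.length : Int) 1,
      ((fun (s : Int × Int) j =>
          let c : Int := if f j = f (j - 1) then s.1 + 1 else 1
          (c, if s.2 < c then c else s.2)) s j) =
      ((fun (s : Int × Int) j =>
          let c : Int := if PySem.List.pyGetD seq j "" = PySem.List.pyGetD seq (j - 1) "" then s.1 + 1 else 1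
          (c, if s.2 < c then c else s.2)) s j) := by
    intro s j hj
    rw [PySem.List.mem_pyRange_one] at hj
    have e1 : PySem.List.pyGetD seq j "" = f j :=
      PySem.List.pyGetD_map_pyRange_of_nonneg f _ j "" (by omega) (by omega)
    have e2 : PySem.List.pyGetD seq (j - 1) "" = f (j - 1) :=
      PySem.List.pyGetD_map_pyRange_of_nonneg f _ (j - 1) "" (by omega) (by omega)
    simp only [e1, e2]
  have hne : seq ≠ [] := by
    intro h
    rw [h] at hlen
    simp at hlen
    omega
  calc ((PySem.List.pyRange 1 (graph.length : Int) 1).foldl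
        (fun (s : Int × Int) j =>
          let c : Int := if f j = f (j - 1) then s.1 + 1 else 1
          (c, if s.2 < c then c else s.2)) (1, ans)).2
      = ((PySem.List.pyRange 1 (seq.length : Int) 1).foldl
        (fun (s : Int × Int) j =>
          let c : Int := if PySem.List.pyGetD seq j "" = PySem.List.pyGetD seq (j - 1) "" then s.1 + 1 else 1
          (c, if s.2 < c then c else s.2)) (1, ans)).2 := by
        rw [hlen]
        exact congrArg Prod.snd (PySem.List.foldl_congr_mem _ _ _ _ hcongr)
    _ = max ans (longestRun seq) := scan_full seq hne ans h1

theorem check_eq_alt (graph : List (List String)) (start_row end_row start_col end_col : Int) :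
    check graph start_row end_row start_col end_col =
    check_alt graph start_row end_row start_col end_col := by
  simp only [check, check_alt]
  by_cases hn : 2 ≤ (graph.length : Int)
  · rw [if_pos hn]
    have hn' : 2 ≤ graph.length := by exact_mod_cast hn
    obtain ⟨hrow, hge1⟩ := foldl_outer
      (fun i => longestRun ((PySem.List.pyRange 0 (graph.length : Int) 1).map
        (fun j => PySem.List.pyGetD (PySem.List.pyGetD graph i []) j "")))
      _ _ (PySem.List.pyRange start_row (end_row + 1) 1)
      (fun a i _ h1 => row_body graph i a hn' h1)
      (fun a i _ _ => rfl)
      1 le_rfl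
    refine Eq.trans ((foldl_outer
      (fun i => longestRun ((PySem.List.pyRange 0 (graph.length : Int) 1).map
        (fun j => PySem.List.pyGetD (PySem.List.pyGetD graph j []) i "")))
      _ _ (PySem.List.pyRange start_col (end_col + 1) 1)
      (fun a i _ h1 => col_body graph i a hn' h1)
      (fun a i _ _ => rfl)
      _ hge1).1) ?_
    rw [hrow]
  · rw [if_neg hn]
    have hnil : PySem.List.pyRange 1 (graph.length : Int) 1 = [] :=
      PySem.List.pyRange_one_eq_nil (by omega)
    simp only [hnil, List.foldl_nil]
    rw [foldl_fixed_pv, foldl_fixed_pv]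

-- ===== VERDICT (by name: the statement is the Claim_ definition above) =====
theorem check_spec : Claim_equal_check := by
  intro graph start_row end_row start_col end_col _ _
  unfold Spec_check
  exact check_eq_alt graph start_row end_row start_col end_col
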